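-- pv_equiv track=rewrite | github.com/jaemoon99/CodingTest | 프로그래머스/unrated/120896. 한 번만 등장한 문자/한 번만 등장한 문자.py | solution
-- ===== SOURCE A (Python) =====
-- def solution(s):
--     set_s = sorted(list(set(s)))
--     s_dict = dict(zip(set_s, len(set_s) * [0]))
--
--     for x in s:
--         s_dict[x] += 1
--
--     value_list = list(s_dict.values())
--     key_list = list(s_dict.keys())
--
--     if value_list.count(1) == 1:
--         return key_list[value_list.index(1)]
--     else:
--         return ''.join([key_list[x] for x in range(len(value_list)) if value_list[x] == 1])
-- ===== SOURCE B (Python) =====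
-- def solution(s):
--     t = sorted(s)
--     out = []
--     i = 0
--     while i < len(t):
--         j = i + 1
--         while j < len(t) and t[j] == t[i]:
--             j += 1
--         if j == i + 1:
--             out.append(t[i])
--         i = j
--     return ''.join(out)
-- ===== Notes on version B (the rewrite author's own statement) =====
-- stated objective: alternative
-- what changed: B sorts the whole string once and scans it for runs of equal characters, emitting characters whose run has length 1; it maintains no frequency dict, no key/value lists and no per-character recount.
import Mathlib
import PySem

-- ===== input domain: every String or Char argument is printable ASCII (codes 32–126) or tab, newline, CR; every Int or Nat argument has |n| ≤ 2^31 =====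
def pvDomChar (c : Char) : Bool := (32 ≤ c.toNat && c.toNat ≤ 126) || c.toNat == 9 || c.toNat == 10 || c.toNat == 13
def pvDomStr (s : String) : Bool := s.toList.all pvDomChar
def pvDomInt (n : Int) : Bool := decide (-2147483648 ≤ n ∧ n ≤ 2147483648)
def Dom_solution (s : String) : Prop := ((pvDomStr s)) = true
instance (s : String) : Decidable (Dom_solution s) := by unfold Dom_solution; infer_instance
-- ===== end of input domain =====

-- B sorts the whole string once and scans it for runs of equal characters, keeping the
-- characters whose run has length 1 — no frequency dict, no key/value lists (objective: alternative).

-- ===== PORT A =====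
def solution (s : String) : String :=
  let cs := s.toList
  let set_s := PySem.List.sorted (PySem.Set.ofList cs) (fun x => x)
  let s_dict := PySem.Dict.ofList (set_s.zip (List.replicate set_s.length (0 : Int)))
  let s_dict := cs.foldl (fun d x => d.modify x 0 (· + 1)) s_dict
  let value_list := s_dict.values
  let key_list := s_dict.keys
  if PySem.List.count value_list 1 == 1 then
    match PySem.List.index? value_list 1 with
    | some i => String.ofList [PySem.List.pyGetD key_list (i : Int) ' ']
    | none => ""  -- unreachable: count = 1 guarantees an occurrence
  else
    PySem.Str.join ""
      (((PySem.List.pyRange 0 (value_list.length : Int) 1).filter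
          (fun x => PySem.List.pyGetD value_list x 0 == 1)).map
        (fun x => String.ofList [PySem.List.pyGetD key_list x ' ']))

-- ===== PORT B =====
-- the outer while-loop of Source B, as structural recursion on the unscanned suffix t[i:];
-- the inner while-loop that advances j over the run of t[i] is the takeWhile
def runScan : List Char → List Char
  | [] => []
  | c :: rest =>
      -- j - i - 1 of Source B: how many further copies of c follow immediately
      let k := (rest.takeWhile (fun x => x == c)).length
      let out := runScan (rest.drop k)
      if k = 0 then c :: out else out
termination_by t => t.length
decreasing_by
  simp only [List.length_drop, List.length_cons]
  omega

def solution_alt (s : String) : String :=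
  PySem.Str.join ""
    ((runScan (PySem.List.sorted s.toList (fun x => x))).map (fun c => String.ofList [c]))

-- ===== PRECONDITION & SPEC =====
def Spec_solution (s : String) (out : String) : Prop := out = solution_alt s
instance (s : String) (out : String) : Decidable (Spec_solution s out) := by unfold Spec_solution; infer_instance

-- ===== CLAIM (what is proved, stated in full; the proofs are below) =====
def Claim_equal_solution : Prop := ∀ (s : String), Dom_solution s → Spec_solution s (solution s)

-- ===== LEMMAS AND PROOFS =====

-- Set.update leaves a set unchanged when all added elements are already members
theorem set_update_of_subset {α : Type} [BEq α] [LawfulBEq α] (xs : List α) (s : PySem.Set α)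
    (h : ∀ x ∈ xs, x ∈ s) : PySem.Set.update s xs = s := by
  induction xs generalizing s with
  | nil => rfl
  | cons a t ih =>
      have ha : PySem.Set.add s a = s := by
        simp [PySem.Set.add, PySem.Set.contains, h a (by simp)]
      show PySem.Set.update (PySem.Set.add s a) t = s
      rw [ha]
      exact ih s (fun x hx => h x (by simp [hx]))

-- a nodup list is its own set
theorem set_ofList_of_nodup {α : Type} [BEq α] [LawfulBEq α] (L : List α) (h : L.Nodup) :
    PySem.Set.ofList L = L := by
  have := PySem.Set.update_eq_append_of_disjoint (s := PySem.Set.empty) (xs := L) h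
    (by intro x _ hx; simp [PySem.Set.empty] at hx)
  simpa [PySem.Set.ofList, PySem.Set.empty] using this

-- the index comprehension over "values = map f keys" is the filter over the keys
theorem range_filter_map_getD (L : List Char) (f : Char → Int) :
    ((List.range L.length).filter (fun k => (L.map f).getD k 0 == 1)).map
        (fun k => L.getD k ' ')
      = L.filter (fun c => f c == 1) := by
  induction L with
  | nil => simp
  | cons a t ih =>
      rw [List.length_cons, List.range_succ_eq_map]
      simp only [List.filter_cons, List.map_cons, List.getD_cons_zero, List.filter_map]
      split_ifs with hfa <;>
        simpa only [List.map_cons, List.map_map, Function.comp_def, List.getD_cons_succ,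
          List.cons.injEq, List.getD_cons_zero, true_and] using ih

-- joining singleton strings with "" is String.ofList
theorem join_singletons (l : List Char) :
    PySem.Str.join "" (l.map (fun c => String.ofList [c])) = String.ofList l := by
  simp only [PySem.Str.join, List.map_map, Function.comp_def, String.toList_ofList]
  rw [show ("" : String).toList = [] from rfl, PySem.Chars.join_nil_singletons]

-- A computes String.ofList of the filtered sorted distinct characters
theorem solution_eq (s : String) :
    solution s
      = String.ofList
          ((PySem.List.sorted (PySem.Set.ofList s.toList) (fun x => x)).filter
            (fun c => s.toList.count c == 1)) := by
  unfold solution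
  set cs := s.toList with hcs
  set L := PySem.List.sorted (PySem.Set.ofList cs) (fun x => x) with hLdef
  have hLnd : L.Nodup :=
    (PySem.List.sorted_perm (PySem.Set.ofList cs) (fun x => x) false).symm.nodup
      (PySem.Set.nodup_ofList cs)
  set pairs := L.zip (List.replicate L.length (0 : Int)) with hpairs
  have hfst : pairs.map Prod.fst = L := List.map_fst_zip (by simp)
  set d0 := PySem.Dict.ofList pairs with hd0
  have hd0foldl : d0 = pairs.foldl (fun acc p => acc.insert p.1 p.2) PySem.Dict.empty := rfl
  have hkeys0 : d0.keys = L := by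
    rw [hd0foldl, PySem.Dict.keys_foldl_insert_key pairs Prod.fst (fun _ p => p.2), hfst]
    show PySem.Set.update [] L = L
    rw [show PySem.Set.update ([] : PySem.Set Char) L = PySem.Set.ofList L from
      (PySem.Set.ofList_eq_foldl L).symm]
    exact set_ofList_of_nodup L hLnd
  have hitems0 : d0.items = pairs := by
    rw [hd0foldl]
    have := PySem.Dict.items_foldl_insert_fresh pairs Prod.fst Prod.snd PySem.Dict.empty
      (by intro a _; simp) (by rw [hfst]; exact hLnd)
    simpa using this
  have hgetD0 : ∀ k, d0.getD k 0 = 0 := by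
    intro k
    rw [PySem.Dict.getD_eq_get?_getD]
    cases hg : d0.get? k with
    | none => rfl
    | some v =>
        have hmem := PySem.Dict.mem_items_of_get?_eq_some d0 hg
        rw [hitems0] at hmem
        have := (List.of_mem_zip hmem).2
        simp [List.eq_of_mem_replicate this]
  set d := cs.foldl (fun d x => d.modify x 0 (· + 1)) d0 with hd
  have hkeys : d.keys = L := by
    rw [hd, PySem.Dict.keys_foldl_modify cs 0 (fun _ _ => (· + 1)), hkeys0]
    exact set_update_of_subset cs L
      (fun x hx => (PySem.List.mem_sorted _ _ _ x).mpr ((PySem.Set.mem_ofList cs x).mpr hx))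
  have hgetD : ∀ k, d.getD k 0 = (cs.count k : Int) := by
    intro k
    rw [hd, PySem.Dict.getD_foldl_modify_add_one, hgetD0, zero_add]
  have hvals : d.values = L.map (fun k => (cs.count k : Int)) := by
    rw [PySem.Dict.values_eq_map_keys d (hkeys ▸ hLnd) 0, hkeys]
    exact List.map_congr_left (fun k _ => hgetD k)
  show (if (PySem.List.count d.values 1 == 1) = true then
      match PySem.List.index? d.values 1 with
      | some i => String.ofList [PySem.List.pyGetD d.keys (↑i) ' ']
      | none => ""
    else
      PySem.Str.join ""
        (List.map (fun x => String.ofList [PySem.List.pyGetD d.keys x ' '])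
          (List.filter (fun x => PySem.List.pyGetD d.values x 0 == 1)
            (PySem.List.pyRange 0 (d.values.length : Int)))))
    = String.ofList (L.filter (fun c => cs.count c == 1))
  rw [hvals, hkeys]
  set F := fun k : Char => ((cs.count k : Int)) with hF
  have hpred : ∀ c : Char, ((F c == 1) : Bool) = (cs.count c == 1) := by
    intro c; simp [hF]
  have hcount : PySem.List.count (L.map F) 1 = (L.filter (fun c => cs.count c == 1)).length := by
    rw [PySem.List.count_eq, List.count_eq_countP, List.countP_map,
      List.countP_eq_length_filter]
    congr 1
    apply List.filter_congr
    intro c _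
    simpa [Function.comp] using hpred c
  by_cases hone : (PySem.List.count (L.map F) 1 == 1) = true
  · rw [if_pos hone]
    have hlen : (L.filter (fun c => cs.count c == 1)).length = 1 := by
      rw [← hcount]; exact Nat.beq_eq_true_eq _ _ ▸ (by simpa using hone)
    obtain ⟨c, hfc⟩ := List.length_eq_one_iff.mp hlen
    obtain ⟨pre, suf, hL, hpre, hpc, hsuf⟩ := List.filter_eq_cons_iff.mp hfc
    have hFc : F c = 1 := by simp [hF]; simpa using hpc
    have hidx : PySem.List.index? (L.map F) 1 = some pre.length := by
      apply (PySem.List.index?_eq_some_iff _ _ _).mpr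
      refine ⟨pre.map F, suf.map F, ?_, by simp, ?_⟩
      · rw [hL, List.map_append, List.map_cons, hFc]
      · intro hmem
        obtain ⟨x, hx, hFx⟩ := List.mem_map.mp hmem
        exact hpre x hx (by
          have : ((List.count x cs : Int)) = 1 := hFx
          simp
          exact_mod_cast this)
    rw [hidx]
    rw [hfc]
    simp [hL]
  · rw [if_neg hone]
    rw [PySem.List.pyRange_one]
    simp only [List.length_map, Int.sub_zero, Int.toNat_natCast, List.filter_map,
      List.map_map, Function.comp_def, zero_add, PySem.List.pyGetD_natCast]
    have hmm : (fun k : Nat => String.ofList [L.getD k ' '])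
        = (fun c : Char => String.ofList [c]) ∘ (fun k : Nat => L.getD k ' ') := rfl
    rw [hmm, ← List.map_map, range_filter_map_getD L F, join_singletons]
    congr 1
    apply List.filter_congr
    intro c _
    exact hpred c

theorem drop_takeWhile_length (p : Char → Bool) (l : List Char) :
    l.drop (l.takeWhile p).length = l.dropWhile p := by
  induction l with
  | nil => rfl
  | cons a t ih =>
      by_cases hp : p a = true
      · simp [hp, ih]
      · simp [hp]

theorem mem_dropWhile_gt (c : Char) (rest : List Char)
    (hlb : ∀ y ∈ rest, c ≤ y) (hs : rest.Pairwise (· ≤ ·)) :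
    ∀ x ∈ rest.dropWhile (fun y => y == c), c < x := by
  induction rest with
  | nil => intro x hx; simp at hx
  | cons a t ih =>
      intro x hx
      by_cases ha : a = c
      · subst ha
        rw [List.dropWhile_cons_of_pos (by simp)] at hx
        exact ih (fun y hy => hlb y (by simp [hy])) hs.tail x hx
      · rw [List.dropWhile_cons_of_neg (by simp [ha])] at hx
        have hca : c < a := lt_of_le_of_ne (hlb a (by simp)) (Ne.symm ha)
        rcases List.mem_cons.mp hx with rfl | hxt
        · exact hca
        · exact lt_of_lt_of_le hca ((List.pairwise_cons.mp hs).1 x hxt)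

theorem runScan_cons (c : Char) (rest : List Char) :
    runScan (c :: rest)
      = (if (rest.takeWhile (fun x => x == c)).length = 0
          then c :: runScan (rest.drop (rest.takeWhile (fun x => x == c)).length)
          else runScan (rest.drop (rest.takeWhile (fun x => x == c)).length)) := by
  rw [runScan]

theorem mem_runScan_aux : ∀ (n : Nat) (t : List Char), t.length ≤ n → t.Pairwise (· ≤ ·) →
    ∀ x, (x ∈ runScan t ↔ t.count x = 1) := by
  intro n
  induction n with
  | zero =>
      intro t ht _ x
      have : t = [] := List.eq_nil_of_length_eq_zero (Nat.le_zero.mp ht)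
      subst this; simp [runScan]
  | succ n ih =>
      intro t ht hs x
      cases t with
      | nil => simp [runScan]
      | cons c rest =>
          have hlb : ∀ y ∈ rest, c ≤ y := (List.pairwise_cons.mp hs).1
          have hdw := drop_takeWhile_length (fun y => y == c) rest
          have hgt := mem_dropWhile_gt c rest hlb hs.tail
          have htw : ∀ y ∈ rest.takeWhile (fun y => y == c), y = c := by
            intro y hy
            have := List.mem_takeWhile_imp hy
            simpa using this
          have hcdw : c ∉ rest.dropWhile (fun y => y == c) := by
            intro hc
            exact lt_irrefl c (hgt c hc)
          have hcount_tw : (rest.takeWhile (fun y => y == c)).count c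
              = (rest.takeWhile (fun y => y == c)).length :=
            List.count_eq_length.mpr (fun b hb => (htw b hb).symm)
          have hcount_rest : rest.count c = (rest.takeWhile (fun y => y == c)).length := by
            conv_lhs => rw [← List.takeWhile_append_dropWhile (p := fun y => y == c) (l := rest)]
            rw [List.count_append, hcount_tw, List.count_eq_zero.mpr hcdw]
            omega
          have hrest_len : rest.length ≤ n := by simpa using Nat.le_of_succ_le_succ ht
          rw [runScan_cons]
          by_cases hk : (rest.takeWhile (fun y => y == c)).length = 0
          · rw [if_pos hk, hk, List.drop_zero]
            have ihr := ih rest hrest_len hs.tail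
            by_cases hxc : x = c
            · simp only [List.mem_cons, hxc, true_or, true_iff]
              rw [List.count_cons_self, hcount_rest, hk]
            · simp only [List.mem_cons, hxc, false_or]
              have hcc : List.count x (c :: rest) = List.count x rest := by
                simp [Ne.symm hxc]
              rw [hcc]
              exact ihr x
          · rw [if_neg hk, hdw]
            have hdwlen : (rest.dropWhile (fun y => y == c)).length ≤ n :=
              le_trans (List.Sublist.length_le (List.dropWhile_sublist _)) hrest_len
            have hdwpw : (rest.dropWhile (fun y => y == c)).Pairwise (· ≤ ·) :=
              hs.tail.sublist (List.dropWhile_sublist _)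
            have ihd := ih _ hdwlen hdwpw x
            rw [ihd]
            by_cases hxc : x = c
            · have hcc : List.count x (c :: rest)
                  = (List.takeWhile (fun y => y == c) rest).length + 1 := by
                rw [hxc, List.count_cons_self, hcount_rest]
              constructor
              · intro h1
                have hxm : x ∈ rest.dropWhile (fun y => y == c) :=
                  List.count_pos_iff.mp (by omega)
                rw [hxc] at hxm
                exact absurd hxm hcdw
              · intro h1; rw [hcc] at h1; omega
            · have hcc : List.count x (c :: rest) = List.count x rest := by
                simp [Ne.symm hxc]
              rw [hcc]
              have : rest.count x = (rest.dropWhile (fun y => y == c)).count x := by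
                conv_lhs => rw [← List.takeWhile_append_dropWhile (p := fun y => y == c) (l := rest)]
                rw [List.count_append, List.count_eq_zero.mpr (fun hx => hxc (htw x hx)), Nat.zero_add]
              rw [this]

theorem runScan_pairwise_aux : ∀ (n : Nat) (t : List Char), t.length ≤ n → t.Pairwise (· ≤ ·) →
    (runScan t).Pairwise (· < ·) := by
  intro n
  induction n with
  | zero =>
      intro t ht _
      have : t = [] := List.eq_nil_of_length_eq_zero (Nat.le_zero.mp ht)
      subst this; simp [runScan]
  | succ n ih =>
      intro t ht hs
      cases t with
      | nil => simp [runScan]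
      | cons c rest =>
          have hlb : ∀ y ∈ rest, c ≤ y := (List.pairwise_cons.mp hs).1
          have hdw := drop_takeWhile_length (fun y => y == c) rest
          have hgt := mem_dropWhile_gt c rest hlb hs.tail
          have hrest_len : rest.length ≤ n := by simpa using Nat.le_of_succ_le_succ ht
          rw [runScan_cons]
          by_cases hk : (rest.takeWhile (fun y => y == c)).length = 0
          · rw [if_pos hk, hk, List.drop_zero]
            refine List.pairwise_cons.mpr ⟨?_, ih rest hrest_len hs.tail⟩
            intro x hx
            have hx1 : rest.count x = 1 := (mem_runScan_aux n rest hrest_len hs.tail x).mp hx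
            have hxr : x ∈ rest := List.count_pos_iff.mp (by omega)
            have hrest_eq : rest.dropWhile (fun y => y == c) = rest := by
              rw [← hdw, hk, List.drop_zero]
            exact hgt x (by rw [hrest_eq]; exact hxr)
          · rw [if_neg hk, hdw]
            exact ih _ (le_trans (List.Sublist.length_le (List.dropWhile_sublist _)) hrest_len)
              (hs.tail.sublist (List.dropWhile_sublist _))

theorem solution_alt_eq_list (cs : List Char) :
    runScan (PySem.List.sorted cs (fun x => x))
      = (PySem.List.sorted (PySem.Set.ofList cs) (fun x => x)).filter
          (fun c => cs.count c == 1) := by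
  set t := PySem.List.sorted cs (fun x => x) with ht
  have htp : t.Pairwise (· ≤ ·) := by
    have := PySem.List.sorted_pairwise cs (fun x => x)
    simpa using this
  set LA := (PySem.List.sorted (PySem.Set.ofList cs) (fun x => x)).filter
      (fun c => cs.count c == 1) with hLA
  have hAlt : LA.Pairwise (· < ·) := (PySem.List.sorted_ofList_pairwise_lt cs).filter _
  have hBlt : (runScan t).Pairwise (· < ·) := runScan_pairwise_aux t.length t le_rfl htp
  have htcnt : ∀ x, t.count x = cs.count x := fun x =>
    (PySem.List.sorted_perm cs (fun x => x) false).count_eq x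
  have hmem : ∀ x, x ∈ runScan t ↔ x ∈ LA := by
    intro x
    rw [mem_runScan_aux t.length t le_rfl htp x, hLA, List.mem_filter,
      PySem.List.mem_sorted, PySem.Set.mem_ofList]
    constructor
    · intro h
      have h' : cs.count x = 1 := by rw [← htcnt x]; exact h
      exact ⟨List.count_pos_iff.mp (by omega), by simp [h']⟩
    · intro ⟨_, h2⟩
      rw [htcnt x]
      simpa using h2
  have hperm : (runScan t).Perm LA :=
    (List.perm_ext_iff_of_nodup (hBlt.imp ne_of_lt) (hAlt.imp ne_of_lt)).mpr hmem
  exact hperm.eq_of_pairwise (fun a b _ _ h1 h2 => absurd h1 (asymm h2)) hBlt hAlt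

-- B computes the same String.ofList as A
theorem solution_alt_eq (s : String) :
    solution_alt s
      = String.ofList
          ((PySem.List.sorted (PySem.Set.ofList s.toList) (fun x => x)).filter
            (fun c => s.toList.count c == 1)) := by
  unfold solution_alt
  rw [join_singletons, solution_alt_eq_list]

-- ===== VERDICT (by name: the statement is the Claim_ definition above) =====
theorem solution_spec : Claim_equal_solution := by
  intro s _
  unfold Spec_solution
  rw [solution_eq, solution_alt_eq]
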